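-- pv_equiv track=rewrite | github.com/coco-in-bluemoon/baekjoon-online-judge | CLASS 2/18111: 마인크래프트/solution.py | solution
-- ===== SOURCE A (Python) =====
-- from collections import Counter
--
-- def solution(board, inventory):
--     HIGHEST = 256
--     answer_height = None
--     answer_second = None
--
--     heights = sum(board, [])
--     total = sum(heights)
--     length = len(heights)
--
--     counter_heights = dict(Counter(heights))
--
--     for target_height in range(HIGHEST+1):
--         if (total + inventory) < (target_height * length):
--             break
--
--         second = 0
--         for height, counter in counter_heights.items():
--             height_diff = abs(target_height - height)
--             if height < target_height:
--                 second += (height_diff * counter)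
--             elif height > target_height:
--                 second += (2 * height_diff * counter)
--
--         if answer_height is None and answer_second is None:
--             answer_height = target_height
--             answer_second = second
--         elif (second < answer_second) or\
--                 (second == answer_second and target_height > answer_height):
--             answer_height = target_height
--             answer_second = second
--
--     return [answer_second, answer_height]
-- ===== SOURCE B (Python) =====
-- def solution(board, inventory):
--     # Sort all heights once; sweep targets 0..256 with a single advancing
--     # pointer (count/sum of cells below the target), so each target's cost
--     # is O(1) instead of a rescan of the height counter.
--     heights = sorted(h for row in board for h in row)
--     n = len(heights)
--     total = sum(heights)
--     best_cost = None
--     best_height = None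
--     i = 0       # number of cells with height < t
--     below = 0   # sum of those heights
--     for t in range(257):
--         if total + inventory < t * n:
--             break
--         while i < n and heights[i] < t:
--             below += heights[i]
--             i += 1
--         cost = t * i - below + 2 * ((total - below) - t * (n - i))
--         if best_cost is None or cost <= best_cost:
--             best_cost = cost
--             best_height = t
--     return [best_cost, best_height]
-- ===== Notes on version B (the rewrite author's own statement) =====
-- stated objective: faster
-- what changed: Instead of building a Counter and rescanning all distinct heights for every target, B sorts the heights once and sweeps targets 0..256 with one advancing pointer holding the count and sum of cells below the target, computing each target's cost in O(1) from those aggregates.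
-- outside the precondition, e.g. on solution([[0]], -1): A returns [None, None], B returns [None, None]
import Mathlib
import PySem

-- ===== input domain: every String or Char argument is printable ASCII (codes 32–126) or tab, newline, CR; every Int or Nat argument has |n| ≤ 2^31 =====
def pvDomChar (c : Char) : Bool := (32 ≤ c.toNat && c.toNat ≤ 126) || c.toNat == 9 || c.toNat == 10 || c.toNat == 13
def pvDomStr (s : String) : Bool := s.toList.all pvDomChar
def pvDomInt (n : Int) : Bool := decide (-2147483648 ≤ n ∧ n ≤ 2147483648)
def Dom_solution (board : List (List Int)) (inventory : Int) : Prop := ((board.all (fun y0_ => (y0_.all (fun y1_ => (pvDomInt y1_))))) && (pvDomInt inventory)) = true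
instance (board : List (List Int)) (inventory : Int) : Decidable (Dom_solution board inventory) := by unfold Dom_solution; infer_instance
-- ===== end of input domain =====

-- B sorts the heights once and sweeps targets with one advancing pointer instead of
-- rescanning a Counter for every target (objective: faster).

-- ===== PORT A =====
-- the 'for target_height in range(257)' loop with its break and running best answer
def solutionLoop (targets : List Int) (total length inventory : Int)
    (counter : PySem.Dict Int Int) (ah asec : Option Int) : Option Int × Option Int :=
  match targets with
  | [] => (ah, asec)
  | t :: rest =>
    if total + inventory < t * length then (ah, asec)
    else
      let second := counter.items.foldl (fun acc p =>
        let height_diff := |t - p.1|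
        if p.1 < t then acc + height_diff * p.2
        else if p.1 > t then acc + 2 * height_diff * p.2
        else acc) 0
      match ah, asec with
      | none, none => solutionLoop rest total length inventory counter (some t) (some second)
      | some h, some c =>
        if second < c ∨ (second = c ∧ t > h) then
          solutionLoop rest total length inventory counter (some t) (some second)
        else
          solutionLoop rest total length inventory counter (some h) (some c)
      | _, _ => solutionLoop rest total length inventory counter ah asec  -- unreachable in A

def solution (board : List (List Int)) (inventory : Int) : List Int :=
  let heights := board.foldl (fun acc row => acc ++ row) []   -- sum(board, [])
  let total := heights.sum
  let length : Int := heights.length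
  let counter := PySem.Dict.counter heights                   -- dict(Counter(heights))
  match solutionLoop (PySem.List.pyRange 0 257 1) total length inventory counter none none with
  | (some h, some c) => [c, h]                                -- [answer_second, answer_height]
  | _ => []                                                   -- Python: [None, None]; outside Pre_

-- ===== PORT B =====
-- the 'while i < n and heights[i] < t' pointer advance
def altWhile (s : List Int) (t : Int) (i : Nat) (below : Int) : Nat × Int :=
  if h : i < s.length then
    if s[i] < t then altWhile s t (i + 1) (below + s[i]) else (i, below)
  else (i, below)
termination_by s.length - i

def altLoop (targets : List Int) (s : List Int) (total : Int) (n : Nat) (inventory : Int)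
    (i : Nat) (below : Int) (best : Option (Int × Int)) : Option (Int × Int) :=
  match targets with
  | [] => best
  | t :: rest =>
    if total + inventory < t * (n : Int) then best
    else
      let ib := altWhile s t i below
      let cost := t * (ib.1 : Int) - ib.2 + 2 * ((total - ib.2) - t * ((n : Int) - (ib.1 : Int)))
      match best with
      | none => altLoop rest s total n inventory ib.1 ib.2 (some (cost, t))
      | some (bc, bh) =>
        if cost ≤ bc then altLoop rest s total n inventory ib.1 ib.2 (some (cost, t))
        else altLoop rest s total n inventory ib.1 ib.2 (some (bc, bh))

def solution_alt (board : List (List Int)) (inventory : Int) : List Int :=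
  let s := PySem.List.sorted board.flatten (fun x => x) false  -- sorted(h for row in board for h in row)
  let n := s.length
  let total := s.sum
  match altLoop (PySem.List.pyRange 0 257 1) s total n inventory 0 0 none with
  | some (c, h) => [c, h]                                      -- [best_cost, best_height]
  | none => []                                                 -- Python: [None, None]; outside Pre_

-- ===== PRECONDITION & SPEC =====
-- Pre_ excludes exactly the inputs where even target 0 is infeasible (sum of all heights
-- plus inventory is negative): there the Python A returns [None, None], which is not a
-- list of ints.
def Pre_solution (board : List (List Int)) (inventory : Int) : Prop :=
  0 ≤ board.flatten.sum + inventory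
instance (board : List (List Int)) (inventory : Int) : Decidable (Pre_solution board inventory) := by
  unfold Pre_solution; infer_instance

def pvWitness_solution : List (List Int) × Int := ([[1, 2], [3, 4]], 5)

def Spec_solution (board : List (List Int)) (inventory : Int) (out : List Int) : Prop := out = solution_alt board inventory
instance (board : List (List Int)) (inventory : Int) (out : List Int) : Decidable (Spec_solution board inventory out) := by unfold Spec_solution; infer_instance

-- ===== CLAIM (what is proved, stated in full; the proofs are below) =====
def Claim_equal_solution : Prop := ∀ (board : List (List Int)) (inventory : Int), Dom_solution board inventory → Pre_solution board inventory → Spec_solution board inventory (solution board inventory)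


-- ===== LEMMAS AND PROOFS =====

-- per-cell levelling cost for target t
def fCost (t h : Int) : Int := if h < t then t - h else if t < h then 2 * (h - t) else 0

-- number of sorted cells strictly below target t
def kOf (s : List Int) (t : Int) : Nat := (s.takeWhile (fun h => decide (h < t))).length

theorem sum_map_sub (t : Int) (l : List Int) :
    (l.map (fun h => t - h)).sum = t * l.length - l.sum := by
  induction l with
  | nil => simp
  | cons x xs ih => simp [ih]; ring

theorem sum_map_two_mul_sub (t : Int) (l : List Int) :
    (l.map (fun h => 2 * (h - t))).sum = 2 * (l.sum - t * l.length) := by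
  induction l with
  | nil => simp
  | cons x xs ih => simp [ih]; ring

theorem indicator_sum (d : List Int) (g : Int → Int) (x : Int) (hnd : d.Nodup) (hx : x ∈ d) :
    (d.map (fun k => if k = x then g k else 0)).sum = g x := by
  induction d with
  | nil => cases hx
  | cons y ys ih =>
    rcases List.mem_cons.mp hx with rfl | h
    · have hnot : x ∉ ys := (List.nodup_cons.mp hnd).1
      have hz : (ys.map (fun k => if k = x then g k else 0)).sum = 0 := by
        rw [List.sum_eq_zero]
        intro z hz
        rcases List.mem_map.mp hz with ⟨k, hk, rfl⟩
        have : k ≠ x := fun hky => hnot (hky ▸ hk)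
        simp [this]
      simp [hz]
    · have hne : y ≠ x := by
        intro hyx; exact (List.nodup_cons.mp hnd).1 (hyx ▸ h)
      simp [hne, ih (List.nodup_cons.mp hnd).2 h]

theorem group_sum (g : Int → Int) (l : List Int) (d : List Int) (hnd : d.Nodup)
    (hsub : ∀ x ∈ l, x ∈ d) :
    (d.map (fun k => g k * (l.count k : Int))).sum = (l.map g).sum := by
  induction l with
  | nil => simp
  | cons x xs ih =>
    have hsub' : ∀ y ∈ xs, y ∈ d := fun y hy => hsub y (List.mem_cons_of_mem _ hy)
    have hx : x ∈ d := hsub x List.mem_cons_self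
    have hsplit : ∀ k : Int, g k * (((x :: xs).count k : Nat) : Int)
        = g k * ((xs.count k : Nat) : Int) + (if k = x then g k else 0) := by
      intro k
      rw [List.count_cons]
      by_cases hkx : k = x
      · subst hkx; simp; ring
      · have : (x == k) = false := by simp [Ne.symm hkx]
        simp [this, hkx]
    calc (d.map (fun k => g k * ((x :: xs).count k : Int))).sum
        = (d.map (fun k => g k * ((xs.count k : Nat) : Int) + (if k = x then g k else 0))).sum := by
          apply congrArg; exact List.map_congr_left (fun k _ => hsplit k)
      _ = (d.map (fun k => g k * ((xs.count k : Nat) : Int))).sum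
            + (d.map (fun k => if k = x then g k else 0)).sum := by
          rw [← List.sum_map_add]
      _ = (xs.map g).sum + g x := by rw [ih hsub', indicator_sum d g x hnd hx]
      _ = ((x :: xs).map g).sum := by simp; ring

-- A's inner loop over Counter items computes the total cost of target t
theorem second_eq (l : List Int) (t : Int) :
    ((PySem.Dict.counter l).items.foldl (fun acc p =>
        let height_diff := |t - p.1|
        if p.1 < t then acc + height_diff * p.2
        else if p.1 > t then acc + 2 * height_diff * p.2
        else acc) 0)
      = (l.map (fCost t)).sum := by
  have hfun : ∀ (acc : Int) (p : Int × Int),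
      (let height_diff := |t - p.1|
       if p.1 < t then acc + height_diff * p.2
       else if p.1 > t then acc + 2 * height_diff * p.2
       else acc)
      = acc + (fCost t p.1) * p.2 := by
    intro acc p
    simp only [fCost]
    split_ifs with h1 h2
    · rw [abs_of_pos (by omega)]
    · rw [abs_of_neg (by omega)]; ring
    · simp
  calc ((PySem.Dict.counter l).items.foldl (fun acc p =>
        let height_diff := |t - p.1|
        if p.1 < t then acc + height_diff * p.2
        else if p.1 > t then acc + 2 * height_diff * p.2
        else acc) 0)
      = ((PySem.Dict.counter l).items.foldl (fun acc p => acc + (fCost t p.1) * p.2) 0) := by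
        apply PySem.List.foldl_congr_mem
        intro acc p _
        exact hfun acc p
    _ = ((PySem.Dict.counter l).items.map (fun p => (fCost t p.1) * p.2)).sum := by
        rw [PySem.List.foldl_add]; simp
    _ = ((PySem.Set.ofList l).map (fun k => (fCost t k) * (l.count k : Int))).sum := by
        rw [PySem.Dict.items_counter, List.map_map]; rfl
    _ = (l.map (fCost t)).sum := by
        exact group_sum (fCost t) l (PySem.Set.ofList l) (PySem.Set.nodup_ofList l)
          (fun x hx => (PySem.Set.mem_ofList l x).mpr hx)

theorem kOf_le_length (s : List Int) (t : Int) : kOf s t ≤ s.length := by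
  unfold kOf
  exact (List.takeWhile_prefix _).length_le

theorem take_kOf (s : List Int) (t : Int) :
    s.take (kOf s t) = s.takeWhile (fun h => decide (h < t)) := by
  unfold kOf
  exact (List.prefix_iff_eq_take.mp (List.takeWhile_prefix _)).symm

theorem getElem_lt_of_lt_kOf (s : List Int) (t : Int) (i : Nat) (hi : i < kOf s t)
    (hil : i < s.length) : s[i] < t := by
  have hlt : i < (s.take (kOf s t)).length := by
    rw [List.length_take]; omega
  have hgeq : (s.take (kOf s t))[i]'hlt = s[i]'hil := List.getElem_take
  have hmem : (s.take (kOf s t))[i]'hlt ∈ s.take (kOf s t) := List.getElem_mem hlt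
  rw [hgeq, take_kOf] at hmem
  simpa using List.mem_takeWhile_imp hmem

theorem getElem_kOf_not_lt (s : List Int) (t : Int) (hk : kOf s t < s.length) :
    ¬ s[kOf s t] < t := by
  have hdrop : s.drop (kOf s t) = s.dropWhile (fun h => decide (h < t)) := by
    have h := List.drop_left' (l₁ := s.takeWhile (fun h => decide (h < t)))
      (l₂ := s.dropWhile (fun h => decide (h < t))) (i := kOf s t) rfl
    rw [List.takeWhile_append_dropWhile] at h
    exact h
  have hhead : (s.drop (kOf s t)).head? = some s[kOf s t] := by
    rw [List.head?_drop]
    simp [hk]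
  have hnot := List.head?_dropWhile_not (fun h => decide (h < t)) s
  rw [← hdrop, hhead] at hnot
  simpa using hnot

theorem altWhile_spec (s : List Int) (t : Int) :
    ∀ (i : Nat) (below : Int), i ≤ kOf s t → below = (s.take i).sum →
      altWhile s t i below = (kOf s t, (s.take (kOf s t)).sum) := by
  intro i
  induction hfuel : s.length - i using Nat.strong_induction_on generalizing i with
  | _ fuel ih =>
  intro below hik hbelow
  rw [altWhile]
  by_cases hil : i < s.length
  · rw [dif_pos hil]
    by_cases hlt : s[i] < t
    · rw [if_pos hlt]
      have hik' : i < kOf s t := by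
        rcases Nat.lt_or_ge i (kOf s t) with h | h
        · exact h
        · exfalso
          have hieq : i = kOf s t := le_antisymm hik h
          subst hieq
          exact getElem_kOf_not_lt s t hil hlt
      have hb' : below + s[i] = (s.take (i + 1)).sum := by
        rw [List.take_add_one, List.sum_append, hbelow]
        simp [List.getElem?_eq_getElem hil]
      exact ih (s.length - (i + 1)) (by omega) (i + 1) rfl (below + s[i]) hik' hb'
    · rw [if_neg hlt]
      have hieq : i = kOf s t := by
        rcases Nat.lt_or_ge i (kOf s t) with h | h
        · exact absurd (getElem_lt_of_lt_kOf s t i h hil) hlt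
        · exact le_antisymm hik h
      subst hieq
      rw [hbelow]
  · rw [dif_neg hil]
    have hieq : i = kOf s t := le_antisymm hik (by have := kOf_le_length s t; omega)
    subst hieq
    rw [hbelow]

theorem dropWhile_ge (s : List Int) (t : Int) (hs : s.Pairwise (· ≤ ·)) :
    ∀ x ∈ s.dropWhile (fun h => decide (h < t)), t ≤ x := by
  intro x hx
  have hsub : (s.dropWhile (fun h => decide (h < t))).Sublist s := List.dropWhile_sublist _
  have hpw : (s.dropWhile (fun h => decide (h < t))).Pairwise (· ≤ ·) :=
    List.Pairwise.sublist hsub hs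
  cases hd : s.dropWhile (fun h => decide (h < t)) with
  | nil => rw [hd] at hx; cases hx
  | cons y ys =>
    have hy : ¬ y < t := by
      have := List.head?_dropWhile_not (fun h => decide (h < t)) s
      rw [hd] at this
      simpa using this
    rw [hd] at hx
    rcases List.mem_cons.mp hx with rfl | hxs
    · omega
    · have : y ≤ x := by
        rw [hd] at hpw
        exact (List.pairwise_cons.mp hpw).1 x hxs
      omega

theorem cost_eq (s : List Int) (t : Int) (hs : s.Pairwise (· ≤ ·)) :
    t * (kOf s t : Int) - (s.take (kOf s t)).sum
      + 2 * ((s.sum - (s.take (kOf s t)).sum) - t * ((s.length : Int) - (kOf s t : Int)))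
      = (s.map (fCost t)).sum := by
  have hsplit := List.takeWhile_append_dropWhile (p := fun h => decide (h < t)) (l := s)
  set tw := s.takeWhile (fun h => decide (h < t)) with htw
  set dw := s.dropWhile (fun h => decide (h < t)) with hdw
  have hmap : (s.map (fCost t)).sum = (tw.map (fCost t)).sum + (dw.map (fCost t)).sum := by
    rw [← hsplit, List.map_append, List.sum_append]
  have htw_cost : (tw.map (fCost t)).sum = t * (tw.length : Int) - tw.sum := by
    have : tw.map (fCost t) = tw.map (fun h => t - h) := by
      apply List.map_congr_left
      intro h hh
      have : h < t := by simpa using List.mem_takeWhile_imp hh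
      simp [fCost, this]
    rw [this, sum_map_sub]
  have hdw_cost : (dw.map (fCost t)).sum = 2 * (dw.sum - t * (dw.length : Int)) := by
    have : dw.map (fCost t) = dw.map (fun h => 2 * (h - t)) := by
      apply List.map_congr_left
      intro h hh
      have hge : t ≤ h := dropWhile_ge s t hs h hh
      rcases eq_or_lt_of_le hge with rfl | hlt
      · simp [fCost]
      · simp [fCost, hlt, not_lt.mpr hge]
    rw [this, sum_map_two_mul_sub]
  have hlen : (s.length : Int) = (tw.length : Int) + (dw.length : Int) := by
    rw [← hsplit, List.length_append]
    push_cast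
    ring
  have hsum : s.sum = tw.sum + dw.sum := by
    rw [← hsplit, List.sum_append]
  have hk : (kOf s t : Int) = (tw.length : Int) := rfl
  have htk : (s.take (kOf s t)).sum = tw.sum := by rw [take_kOf]
  rw [hmap, htw_cost, hdw_cost, hk, htk, hsum, hlen]
  ring

theorem kOf_mono (s : List Int) (t t' : Int) (hs : s.Pairwise (· ≤ ·)) (htt' : t ≤ t') :
    kOf s t ≤ kOf s t' := by
  have hcount : ∀ u : Int, kOf s u = s.countP (fun h => decide (h < u)) := by
    intro u
    have hsplit := List.takeWhile_append_dropWhile (p := fun h => decide (h < u)) (l := s)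
    have h1 : (s.takeWhile (fun h => decide (h < u))).countP (fun h => decide (h < u))
        = (s.takeWhile (fun h => decide (h < u))).length := by
      rw [List.countP_eq_length]
      intro a ha
      exact List.mem_takeWhile_imp (p := fun h => decide (h < u)) ha
    have h2 : (s.dropWhile (fun h => decide (h < u))).countP (fun h => decide (h < u)) = 0 := by
      rw [List.countP_eq_zero]
      intro a ha
      have := dropWhile_ge s u hs a ha
      simpa using this
    have := congrArg (List.countP (fun h => decide (h < u))) hsplit
    rw [List.countP_append, h1, h2] at this
    unfold kOf
    omega
  rw [hcount t, hcount t']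
  apply List.countP_mono_left
  intro x _ hx
  simp only [decide_eq_true_eq] at *
  omega

-- B's best-so-far state rendered as A's two variables
def packState (best : Option (Int × Int)) : Option Int × Option Int :=
  match best with
  | none => (none, none)
  | some (c, h) => (some h, some c)

theorem loop_eq (l s : List Int) (hperm : s.Perm l) (hs : s.Pairwise (· ≤ ·)) (inventory : Int)
    (targets : List Int) :
    targets.Pairwise (· < ·) →
    ∀ (i : Nat) (below : Int) (best : Option (Int × Int)) (ah asec : Option Int),
    (∀ t ∈ targets, i ≤ kOf s t) →
    below = (s.take i).sum →
    ((ah = none ∧ asec = none ∧ best = none) ∨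
      (∃ h c, ah = some h ∧ asec = some c ∧ best = some (c, h) ∧ ∀ t' ∈ targets, h < t')) →
    solutionLoop targets l.sum (l.length : Int) inventory (PySem.Dict.counter l) ah asec
      = packState (altLoop targets s s.sum s.length inventory i below best) := by
  have hsum : l.sum = s.sum := hperm.sum_eq.symm
  have hlen : l.length = s.length := hperm.length_eq.symm
  induction targets with
  | nil =>
    intro _ i below best ah asec _ _ hstate
    rw [solutionLoop, altLoop]
    rcases hstate with ⟨rfl, rfl, rfl⟩ | ⟨h, c, rfl, rfl, rfl, _⟩ <;> simp [packState]
  | cons t rest ih =>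
    intro hpw i below best ah asec hik hbelow hstate
    have hpwc := List.pairwise_cons.mp hpw
    have hbrA : (l.sum + inventory < t * (l.length : Int))
        ↔ (s.sum + inventory < t * (s.length : Int)) := by rw [hsum, hlen]
    rw [solutionLoop, altLoop]
    by_cases hbr : s.sum + inventory < t * (s.length : Int)
    · rw [if_pos (hbrA.mpr hbr), if_pos hbr]
      rcases hstate with ⟨rfl, rfl, rfl⟩ | ⟨h, c, rfl, rfl, rfl, _⟩ <;> simp [packState]
    · rw [if_neg (fun hh => hbr (hbrA.mp hh)), if_neg hbr]
      have hW : altWhile s t i below = (kOf s t, (s.take (kOf s t)).sum) :=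
        altWhile_spec s t i below (hik t List.mem_cons_self) hbelow
      rw [hW]
      have hsec :
          ((PySem.Dict.counter l).items.foldl (fun acc p =>
            let height_diff := |t - p.1|
            if p.1 < t then acc + height_diff * p.2
            else if p.1 > t then acc + 2 * height_diff * p.2
            else acc) 0)
          = t * ((kOf s t : Nat) : Int) - (s.take (kOf s t)).sum
              + 2 * ((s.sum - (s.take (kOf s t)).sum)
                  - t * ((s.length : Int) - ((kOf s t : Nat) : Int))) := by
        rw [second_eq l t, cost_eq s t hs]
        exact ((hperm.map (fCost t)).sum_eq).symm
      have hik' : ∀ t' ∈ rest, kOf s t ≤ kOf s t' := by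
        intro t' ht'
        exact kOf_mono s t t' hs (le_of_lt (hpwc.1 t' ht'))
      rcases hstate with ⟨rfl, rfl, rfl⟩ | ⟨h, c, rfl, rfl, rfl, hless⟩
      · dsimp only
        rw [hsec]
        exact ih hpwc.2 (kOf s t) _ _ _ _ hik' rfl
          (Or.inr ⟨t, _, rfl, rfl, rfl, fun t' ht' => hpwc.1 t' ht'⟩)
      · have ht : h < t := hless t List.mem_cons_self
        dsimp only
        rw [hsec]
        generalize (t * ((kOf s t : Nat) : Int) - (s.take (kOf s t)).sum
              + 2 * ((s.sum - (s.take (kOf s t)).sum)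
                  - t * ((s.length : Int) - ((kOf s t : Nat) : Int)))) = cost
        by_cases hc : cost ≤ c
        · have hcondA : cost < c ∨ (cost = c ∧ t > h) := by
            rcases lt_or_eq_of_le hc with h' | h'
            · exact Or.inl h'
            · exact Or.inr ⟨h', ht⟩
          rw [if_pos hcondA, if_pos hc]
          exact ih hpwc.2 (kOf s t) _ _ _ _ hik' rfl
            (Or.inr ⟨t, _, rfl, rfl, rfl, fun t' ht' => hpwc.1 t' ht'⟩)
        · have hcondA : ¬ (cost < c ∨ (cost = c ∧ t > h)) := by
            intro hcond
            rcases hcond with h' | ⟨h', _⟩ <;> omega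
          rw [if_neg hcondA, if_neg hc]
          exact ih hpwc.2 (kOf s t) _ _ _ _ hik' rfl
            (Or.inr ⟨h, c, rfl, rfl, rfl, fun t' ht' => hless t' (List.mem_cons_of_mem _ ht')⟩)

-- ===== VERDICT (by name: the statement is the Claim_ definition above) =====
theorem solution_spec : Claim_equal_solution := by
  unfold Claim_equal_solution
  intro board inventory _ _
  unfold Spec_solution solution solution_alt
  have hflat : board.foldl (fun acc row => acc ++ row) [] = board.flatten := by
    simpa using PySem.List.foldl_append_eq_flatten board []
  rw [hflat]
  dsimp only
  have hperm : (PySem.List.sorted board.flatten (fun x => x) false).Perm board.flatten :=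
    PySem.List.sorted_perm board.flatten _ _
  have hs : (PySem.List.sorted board.flatten (fun x => x) false).Pairwise (· ≤ ·) :=
    PySem.List.sorted_pairwise board.flatten (fun x => x)
  have hmain := loop_eq board.flatten (PySem.List.sorted board.flatten (fun x => x) false)
    hperm hs inventory (PySem.List.pyRange 0 257 1)
    (PySem.List.pairwise_lt_pyRange_one 0 257) 0 0 none none none
    (fun t _ => Nat.zero_le _) (by simp) (Or.inl ⟨rfl, rfl, rfl⟩)
  rw [hmain]
  rcases altLoop (PySem.List.pyRange 0 257 1) (PySem.List.sorted board.flatten (fun x => x) false)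
      (PySem.List.sorted board.flatten (fun x => x) false).sum
      (PySem.List.sorted board.flatten (fun x => x) false).length inventory 0 0 none with
    _ | ⟨c, h⟩ <;> simp [packState]
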